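-- pv_equiv track=rewrite | github.com/David-Xiang/Online-Judge-Solutions | 230414/LC1023.py | matchOne
-- ===== SOURCE A (Python) =====
-- def matchOne(query: str, pattern: str) -> bool:
--     q, p = 0, 0
--     while q < len(query):
--         if query[q].islower():
--             if p < len(pattern) and query[q] == pattern[p]:
--                 p = p + 1
--             q = q + 1
--         else: # query[q] isupper
--             if p < len(pattern) and query[q] == pattern[p]:
--                 p, q = p + 1, q + 1
--             else:
--                 return False
--
--     if p < len(pattern):
--         return False
--     return True
-- ===== SOURCE B (Python) =====
-- def matchOne(query: str, pattern: str) -> bool: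
--     # Pass 1: the non-lowercase characters must appear identically, in order.
--     if [c for c in query if not c.islower()] != [c for c in pattern if not c.islower()]:
--         return False
--     # Pass 2: pattern must be a greedy subsequence of query.
--     i = 0
--     for c in query:
--         if i < len(pattern) and pattern[i] == c:
--             i += 1
--     return i == len(pattern)
-- ===== Notes on version B (the rewrite author's own statement) =====
-- stated objective: alternative
-- what changed: A's single interleaved index-pointer loop is split into two independent passes: an ordered equality check of the non-lowercase characters of query and pattern, plus a separate greedy subsequence scan over query with a pattern counter.
import Mathlib
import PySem

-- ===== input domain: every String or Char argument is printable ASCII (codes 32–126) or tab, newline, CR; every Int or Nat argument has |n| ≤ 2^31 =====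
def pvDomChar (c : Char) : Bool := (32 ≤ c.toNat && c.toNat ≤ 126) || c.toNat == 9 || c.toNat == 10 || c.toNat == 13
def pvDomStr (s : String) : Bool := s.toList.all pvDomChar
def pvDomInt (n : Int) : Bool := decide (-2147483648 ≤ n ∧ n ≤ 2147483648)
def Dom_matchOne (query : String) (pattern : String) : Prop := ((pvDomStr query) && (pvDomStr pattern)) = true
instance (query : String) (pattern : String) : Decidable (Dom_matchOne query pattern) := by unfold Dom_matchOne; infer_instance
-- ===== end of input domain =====

-- B replaces A's single interleaved two-pointer loop by two independent passes
-- (ordered equality of the non-lowercase characters, then a greedy subsequence scan);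
-- same cost, different decomposition ("alternative").

-- ===== PORT A =====
-- A's while loop over the two indices q (into query) and p (into pattern).
def matchOneLoop (qs ps : List Char) (q p : Nat) : Bool :=
  if h : q < qs.length then
    if PySem.Chars.islower qs[q] then
      if decide (p < ps.length) && (qs[q] == ps[p]!) then
        matchOneLoop qs ps (q + 1) (p + 1)
      else
        matchOneLoop qs ps (q + 1) p
    else
      if decide (p < ps.length) && (qs[q] == ps[p]!) then
        matchOneLoop qs ps (q + 1) (p + 1)
      else
        false
  else
    !decide (p < ps.length)
termination_by qs.length - q

def matchOne (query : String) (pattern : String) : Bool :=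
  matchOneLoop query.toList pattern.toList 0 0

-- ===== PORT B =====
-- [c for c in s if not c.islower()]
def capsOf (cs : List Char) : List Char := cs.filter (fun c => !PySem.Chars.islower c)

def matchOne_alt (query : String) (pattern : String) : Bool :=
  (capsOf query.toList == capsOf pattern.toList)
    && (query.toList.foldl
          (fun i c =>
            if decide (i < pattern.toList.length) && (pattern.toList[i]! == c) then i + 1 else i)
          0
        == pattern.toList.length)

-- ===== PRECONDITION & SPEC =====
def Spec_matchOne (query : String) (pattern : String) (out : Bool) : Prop := out = matchOne_alt query pattern
instance (query : String) (pattern : String) (out : Bool) : Decidable (Spec_matchOne query pattern out) := by unfold Spec_matchOne; infer_instance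

-- ===== CLAIM (what is proved, stated in full; the proofs are below) =====
def Claim_equal_matchOne : Prop := ∀ (query : String) (pattern : String), Dom_matchOne query pattern → Spec_matchOne query pattern (matchOne query pattern)

-- ===== LEMMAS AND PROOFS =====

-- greedy pop-the-head step, the proof's common currency between the two forms
def subStep (rem : List Char) (c : Char) : List Char :=
  match rem with
  | [] => []
  | r :: rs => if r == c then rs else r :: rs

-- the remaining-pattern list never grows
lemma foldl_subStep_length_le (qs : List Char) : ∀ rem : List Char,
    (qs.foldl subStep rem).length ≤ rem.length := by
  induction qs with
  | nil => intro rem; simp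
  | cons c qs ih =>
    intro rem
    refine le_trans (ih (subStep rem c)) ?_
    match rem with
    | [] => simp [subStep]
    | r :: rs =>
      by_cases he : (r == c) = true <;> simp [subStep, he]

-- B's index counter tracks the length of the greedily consumed pattern prefix
lemma idx_fold_eq (ps : List Char) (qs : List Char) : ∀ i : Nat, i ≤ ps.length →
    qs.foldl (fun j c => if decide (j < ps.length) && (ps[j]! == c) then j + 1 else j) i
      = ps.length - (qs.foldl subStep (ps.drop i)).length := by
  induction qs with
  | nil =>
    intro i hi
    simp only [List.foldl_nil, List.length_drop]
    omega
  | cons c qs ih =>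
    intro i hi
    simp only [List.foldl_cons]
    by_cases hilt : i < ps.length
    · rw [List.drop_eq_getElem_cons hilt]
      rw [getElem!_pos _ i hilt]
      by_cases he : (ps[i] == c) = true
      · simp only [subStep, he, if_pos, hilt, decide_true, Bool.true_and]
        exact ih (i + 1) (by omega)
      · simp only [subStep, he, Bool.false_eq_true, if_neg, not_false_eq_true, hilt,
          decide_true, Bool.true_and]
        rw [ih i hi, List.drop_eq_getElem_cons hilt]
    · have hieq : i = ps.length := by omega
      have hdrop : ps.drop i = [] := List.drop_eq_nil_iff.mpr (by omega)
      simp only [hdrop, subStep, hilt, decide_false, Bool.false_and, Bool.false_eq_true,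
        if_neg, not_false_eq_true]
      rw [ih i hi, hdrop]

-- structural (list-suffix) form of A's index loop
def matchOneL : List Char → List Char → Bool
  | [], ps => ps.isEmpty
  | c :: qs, [] => if PySem.Chars.islower c then matchOneL qs [] else false
  | c :: qs, p :: ps =>
    if PySem.Chars.islower c then
      if c == p then matchOneL qs ps else matchOneL qs (p :: ps)
    else
      if c == p then matchOneL qs ps else false

-- A's index loop computes matchOneL of the two suffixes
lemma matchOneLoop_eq_L (qs ps : List Char) (q p : Nat) :
    matchOneLoop qs ps q p = matchOneL (qs.drop q) (ps.drop p) := by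
  fun_induction matchOneLoop qs ps q p with
  | case1 q p h hlow hm ih =>
    rw [ih, List.drop_eq_getElem_cons h]
    simp only [Bool.and_eq_true, decide_eq_true_eq] at hm
    obtain ⟨hp, he⟩ := hm
    rw [List.drop_eq_getElem_cons hp]
    rw [getElem!_pos _ p hp] at he
    simp [matchOneL, hlow, he]
  | case2 q p h hlow hm ih =>
    rw [ih, List.drop_eq_getElem_cons h]
    by_cases hp : p < ps.length
    · rw [List.drop_eq_getElem_cons hp]
      rw [getElem!_pos _ p hp] at hm
      simp only [Bool.and_eq_true, decide_eq_true_eq, not_and] at hm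
      have hne : ¬ (qs[q] == ps[p]) = true := hm hp
      simp [matchOneL, hlow, hne]
    · rw [show List.drop p ps = [] from List.drop_eq_nil_iff.mpr (by omega)]
      simp [matchOneL, hlow]
  | case3 q p h hlow hm ih =>
    rw [ih, List.drop_eq_getElem_cons h]
    simp only [Bool.and_eq_true, decide_eq_true_eq] at hm
    obtain ⟨hp, he⟩ := hm
    rw [List.drop_eq_getElem_cons hp]
    rw [getElem!_pos _ p hp] at he
    simp [matchOneL, hlow, he]
  | case4 q p h hlow hm =>
    rw [List.drop_eq_getElem_cons h]
    by_cases hp : p < ps.length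
    · rw [List.drop_eq_getElem_cons hp]
      rw [getElem!_pos _ p hp] at hm
      simp only [Bool.and_eq_true, decide_eq_true_eq, not_and] at hm
      have hne : ¬ (qs[q] == ps[p]) = true := hm hp
      simp [matchOneL, hlow, hne]
    · rw [show List.drop p ps = [] from List.drop_eq_nil_iff.mpr (by omega)]
      simp [matchOneL, hlow]
  | case5 q p h =>
    rw [show List.drop q qs = [] from List.drop_eq_nil_iff.mpr (by omega)]
    by_cases hp : p < ps.length
    · have hne : ps.drop p ≠ [] := by
        intro hc; have := List.drop_eq_nil_iff.mp hc; omega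
      simp [matchOneL, hp, hne]
    · rw [show List.drop p ps = [] from List.drop_eq_nil_iff.mpr (by omega)]
      simp [matchOneL, hp]

-- if B's greedy scan empties the remaining pattern, the pattern was a subsequence
lemma foldl_subStep_nil_sublist (qs : List Char) : ∀ ps : List Char,
    qs.foldl subStep ps = [] → ps.Sublist qs := by
  induction qs with
  | nil => intro ps h; simp at h; simp [h]
  | cons c qs ih =>
    intro ps h
    simp only [List.foldl_cons] at h
    match ps with
    | [] => exact List.nil_sublist _
    | r :: rs =>
      by_cases he : (r == c) = true
      · have hr : r = c := eq_of_beq he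
        subst hr
        simp only [subStep, he, if_pos] at h
        exact List.Sublist.cons₂ _ (ih _ h)
      · simp only [subStep, he, Bool.false_eq_true, if_neg, not_false_eq_true] at h
        exact List.Sublist.cons _ (ih _ h)

-- the structural form of A equals B's two passes
lemma matchOneL_eq_alt (qs : List Char) : ∀ ps : List Char,
    matchOneL qs ps = ((capsOf qs == capsOf ps) && (qs.foldl subStep ps).isEmpty) := by
  induction qs with
  | nil =>
    intro ps
    match ps with
    | [] => simp [matchOneL, capsOf]
    | p :: rs => simp [matchOneL, capsOf]
  | cons c qs ih =>
    intro ps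
    by_cases hlow : PySem.Chars.islower c = true
    · match ps with
      | [] =>
        rw [show matchOneL (c :: qs) [] = matchOneL qs [] from by simp [matchOneL, hlow]]
        rw [ih []]
        simp [capsOf, subStep, hlow]
      | p :: rs =>
        by_cases he : (c == p) = true
        · have hc : c = p := eq_of_beq he
          subst hc
          rw [show matchOneL (c :: qs) (c :: rs) = matchOneL qs rs from by
            simp [matchOneL, hlow]]
          rw [ih rs]
          simp [capsOf, subStep, hlow]
        · have hpc : (p == c) = false :=
            beq_eq_false_iff_ne.mpr (Ne.symm (fun hq => he (beq_iff_eq.mpr hq)))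
          rw [show matchOneL (c :: qs) (p :: rs) = matchOneL qs (p :: rs) from by
            simp [matchOneL, hlow, he]]
          rw [ih (p :: rs)]
          simp [capsOf, subStep, hlow, hpc]
    · match ps with
      | [] =>
        rw [show matchOneL (c :: qs) [] = false from by simp [matchOneL, hlow]]
        symm
        rw [Bool.and_eq_false_iff]
        left
        rw [show capsOf (c :: qs) = c :: capsOf qs from by simp [capsOf, hlow],
          show capsOf [] = [] from rfl]
        simp
      | p :: rs =>
        by_cases he : (c == p) = true
        · have hc : c = p := eq_of_beq he
          subst hc
          rw [show matchOneL (c :: qs) (c :: rs) = matchOneL qs rs from by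
            simp [matchOneL, hlow]]
          rw [ih rs]
          simp [capsOf, subStep, hlow]
        · -- A returns False here; show B's conjunction is False too
          have hpc : (p == c) = false :=
            beq_eq_false_iff_ne.mpr (Ne.symm (fun hq => he (beq_iff_eq.mpr hq)))
          rw [show matchOneL (c :: qs) (p :: rs) = false from by
            simp [matchOneL, hlow, he]]
          symm
          have hstep : List.foldl subStep (p :: rs) (c :: qs)
              = List.foldl subStep (p :: rs) qs := by
            simp [List.foldl_cons, subStep, hpc]
          have hcq : capsOf (c :: qs) = c :: capsOf qs := by simp [capsOf, hlow]
          rw [hstep, Bool.and_eq_false_iff]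
          by_cases hplow : PySem.Chars.islower p = true
          · -- p lowercase: a length argument refutes the caps equality if the scan succeeds
            by_cases hemp : (qs.foldl subStep (p :: rs)) = []
            · left
              have hsub : (p :: rs).Sublist qs := foldl_subStep_nil_sublist qs _ hemp
              have hsub2 : rs.Sublist qs := (List.sublist_cons_self p rs).trans hsub
              have hlen : (capsOf rs).length ≤ (capsOf qs).length :=
                List.Sublist.length_le (List.Sublist.filter _ hsub2)
              have hcp : capsOf (p :: rs) = capsOf rs := by simp [capsOf, hplow]
              rw [hcq, hcp, beq_eq_false_iff_ne]
              intro hc2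
              have hlencontra := congrArg List.length hc2
              simp only [List.length_cons] at hlencontra
              omega
            · right
              simp [hemp]
          · -- p not lowercase: the caps lists have different heads
            left
            have hcp : capsOf (p :: rs) = p :: capsOf rs := by simp [capsOf, hplow]
            rw [hcq, hcp, beq_eq_false_iff_ne]
            intro hc2
            exact he (beq_iff_eq.mpr ((List.cons.injEq _ _ _ _).mp hc2).1)

-- ===== VERDICT (by name: the statement is the Claim_ definition above) =====
theorem matchOne_spec : Claim_equal_matchOne := by
  intro query pattern _
  unfold Spec_matchOne matchOne matchOne_alt
  rw [matchOneLoop_eq_L]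
  simp only [List.drop_zero]
  rw [matchOneL_eq_alt]
  congr 1
  rw [idx_fold_eq _ _ 0 (Nat.zero_le _), List.drop_zero]
  have hle := foldl_subStep_length_le query.toList pattern.toList
  by_cases hnil : List.foldl subStep pattern.toList query.toList = []
  · simp [hnil]
  · have hpos : 0 < (List.foldl subStep pattern.toList query.toList).length :=
      List.length_pos_iff.mpr hnil
    have hne : pattern.toList.length - (List.foldl subStep pattern.toList query.toList).length
        ≠ pattern.toList.length := by omega
    have h1 : (List.foldl subStep pattern.toList query.toList).isEmpty = false := by
      simp [hnil]
    rw [h1]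
    symm
    rw [beq_eq_false_iff_ne]
    have hlen : pattern.length = pattern.toList.length := pattern.length_toList.symm
    omega
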